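-- pv_equiv track=rewrite | github.com/hrz123/algorithm010 | Week06/每日一题/面试题 17.13. 恢复空格.py | respace
-- ===== SOURCE A (Python) =====
-- from typing import List
--
-- def respace(dictionary: List[str], sentence: str) -> int:
--     dictionary = {w for w in dictionary if sentence.find(w) != -1}
--     if not dictionary:
--         return len(sentence)
--     n = len(sentence)
--     memo = {}
--     sizes = {len(w) for w in dictionary}
--
--     def dfs(i):
--         if i == 0:
--             return 0
--         if i in memo:
--             return memo[i]
--         memo[i] = min([1 + dfs(i - 1)] +
--                       [dfs(i - l) for l in sizes if i - l >= 0
--                        and sentence[i - l:i] in dictionary])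
--         return memo[i]
--
--     return dfs(n)
-- ===== SOURCE B (Python) =====
-- from typing import List
--
--
-- def respace(dictionary: List[str], sentence: str) -> int:
--     words = {w for w in dictionary if w in sentence}
--     if not words:
--         return len(sentence)
--     n = len(sentence)
--     sizes = {len(w) for w in words}
--     dp = [0]
--     for i in range(1, n + 1):
--         best = dp[i - 1] + 1
--         for l in sizes:
--             if l <= i and sentence[i - l:i] in words:
--                 best = min(best, dp[i - l])
--         dp.append(best)
--     return dp[n]
-- ===== Notes on version B (the rewrite author's own statement) =====
-- stated objective: alternative
-- what changed: Replaced A's memoized top-down recursion (dfs with a memo dict) by a bottom-up iterative DP that appends dp[i] for i = 1..n to a table, reading earlier entries instead of recursing; same dictionary filter and recurrence.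
import Mathlib
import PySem

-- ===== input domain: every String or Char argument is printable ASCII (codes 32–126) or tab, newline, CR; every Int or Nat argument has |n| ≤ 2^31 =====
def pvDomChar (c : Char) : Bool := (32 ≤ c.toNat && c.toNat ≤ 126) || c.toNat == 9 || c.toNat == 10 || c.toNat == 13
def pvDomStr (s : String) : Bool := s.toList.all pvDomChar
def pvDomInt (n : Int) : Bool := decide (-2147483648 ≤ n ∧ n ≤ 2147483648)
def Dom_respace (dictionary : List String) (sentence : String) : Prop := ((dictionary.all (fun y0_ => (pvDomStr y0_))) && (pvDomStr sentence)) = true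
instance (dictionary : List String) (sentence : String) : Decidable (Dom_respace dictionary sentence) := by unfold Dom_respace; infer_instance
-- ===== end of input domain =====

-- B replaces A's memoized top-down recursion by a bottom-up table, appended entry by entry (same
-- recurrence, iterative decomposition); objective: simpler. Equivalence is about the return value.

-- ===== PORT A =====
-- Python's dfs with its memo dictionary threaded through explicitly; dfsACands is the list
-- comprehension [dfs(i - l) for l in sizes if i - l >= 0 and sentence[i-l:i] in dictionary].
-- The extra `1 ≤ l` guard only rules out the empty word, on which Python's dfs recurses forever
-- (RecursionError) — those inputs are excluded by Pre_respace.
mutual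
def dfsA (dict : List (List Char)) (sizes : List Int) (s : List Char) :
    Nat → PySem.Dict Int Int → Int × PySem.Dict Int Int
  | 0, memo => (0, memo)
  | (i+1), memo =>
    match memo.get? ((i+1 : Nat) : Int) with
    | some v => (v, memo)
    | none =>
      let r0 := dfsA dict sizes s i memo
      let r1 := dfsACands dict sizes s (i+1) sizes r0.2
      let v := r1.1.foldl min (1 + r0.1)
      (v, r1.2.insert ((i+1 : Nat) : Int) v)
termination_by i memo => (i, 1, 0)
decreasing_by
  · exact Prod.Lex.left _ _ (by omega)
  · exact Prod.Lex.right _ (Prod.Lex.left _ _ (by omega))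

def dfsACands (dict : List (List Char)) (sizes : List Int) (s : List Char) (ip1 : Nat) :
    List Int → PySem.Dict Int Int → List Int × PySem.Dict Int Int
  | [], memo => ([], memo)
  | l :: ls, memo =>
    if h : 1 ≤ l ∧ 0 ≤ (ip1 : Int) - l ∧ PySem.List.slice s (some ((ip1 : Int) - l)) (some (ip1 : Int)) ∈ dict then
      let r := dfsA dict sizes s (ip1 - l.toNat) memo
      let rs := dfsACands dict sizes s ip1 ls r.2
      (r.1 :: rs.1, rs.2)
    else
      dfsACands dict sizes s ip1 ls memo
termination_by ls memo => (ip1, 0, ls.length)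
decreasing_by
  · obtain ⟨h1, h2, -⟩ := h; exact Prod.Lex.left _ _ (by omega)
  · exact Prod.Lex.right _ (Prod.Lex.right _ (by simp))
  · exact Prod.Lex.right _ (Prod.Lex.right _ (by simp))
end

def respace (dictionary : List String) (sentence : String) : Int :=
  let dict : List String := PySem.Set.ofList (dictionary.filter (fun w => PySem.Str.find sentence w != -1))
  if dict.isEmpty then PySem.Str.len sentence
  else
    let sizes : List Int := PySem.Set.ofList (dict.map (fun w => PySem.Str.len w))
    (dfsA (dict.map String.toList) sizes sentence.toList sentence.toList.length PySem.Dict.empty).1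

-- ===== PORT B =====
-- the bottom-up loop `for i in range(1, n + 1): … dp.append(best)` of Source B
def buildDp (words : List (List Char)) (sizes : List Int) (s : List Char) : Nat → List Int
  | 0 => [0]
  | (i+1) =>
    let ip1 : Nat := i + 1
    let dp := buildDp words sizes s i
    dp ++ [sizes.foldl (fun best l =>
      if l ≤ (ip1 : Int) ∧ PySem.List.slice s (some ((ip1 : Int) - l)) (some (ip1 : Int)) ∈ words
      then min best (dp.getD (ip1 - l.toNat) 0) else best) (dp.getD i 0 + 1)]

def respace_alt (dictionary : List String) (sentence : String) : Int :=
  let words : List String := PySem.Set.ofList (dictionary.filter (fun w => PySem.Str.isIn w sentence))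
  if words.isEmpty then PySem.Str.len sentence
  else
    let sizes : List Int := PySem.Set.ofList (words.map (fun w => PySem.Str.len w))
    (buildDp (words.map String.toList) sizes sentence.toList sentence.toList.length).getD sentence.toList.length 0

-- ===== PRECONDITION & SPEC =====
-- Pre_ excludes dictionaries containing the empty word together with a nonempty sentence: there
-- Python A hits unbounded recursion (RecursionError) and Python B raises IndexError; neither returns.
def Pre_respace (dictionary : List String) (sentence : String) : Prop :=
  "" ∉ dictionary ∨ sentence = ""
instance (dictionary : List String) (sentence : String) : Decidable (Pre_respace dictionary sentence) := by unfold Pre_respace; infer_instance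

def pvWitness_respace : List String × String := (["ab", "a"], "aab")

def Spec_respace (dictionary : List String) (sentence : String) (out : Int) : Prop := out = respace_alt dictionary sentence
instance (dictionary : List String) (sentence : String) (out : Int) : Decidable (Spec_respace dictionary sentence out) := by unfold Spec_respace; infer_instance

-- ===== CLAIM (what is proved, stated in full; the proofs are below) =====
def Claim_equal_respace : Prop := ∀ (dictionary : List String) (sentence : String), Dom_respace dictionary sentence → Pre_respace dictionary sentence → Spec_respace dictionary sentence (respace dictionary sentence)

-- ===== LEMMAS AND PROOFS =====

-- value of the optimal table at index i (B's dp[i])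
def Vdp (W : List (List Char)) (SZ : List Int) (s : List Char) (i : Nat) : Int :=
  (buildDp W SZ s i).getD i 0

theorem length_buildDp (W : List (List Char)) (SZ : List Int) (s : List Char) (i : Nat) :
    (buildDp W SZ s i).length = i + 1 := by
  induction i with
  | zero => simp [buildDp]
  | succ i ih => simp [buildDp, ih]

theorem buildDp_getD (W : List (List Char)) (SZ : List Int) (s : List Char)
    {j i : Nat} (h : j ≤ i) : (buildDp W SZ s i).getD j 0 = Vdp W SZ s j := by
  induction i with
  | zero =>
    have : j = 0 := by omega
    subst this; rfl
  | succ i ih =>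
    rcases Nat.lt_or_ge j (i+1) with hj | hj
    · show (buildDp W SZ s (i+1)).getD j 0 = _
      rw [show buildDp W SZ s (i+1) = buildDp W SZ s i ++ [_] from rfl]
      rw [List.getD_append _ _ _ j (by rw [length_buildDp]; omega)]
      exact ih (by omega)
    · have : j = i + 1 := by omega
      subst this; rfl

theorem Vdp_succ (W : List (List Char)) (SZ : List Int) (s : List Char)
    (hSZ : ∀ l ∈ SZ, 1 ≤ l) (i : Nat) :
    Vdp W SZ s (i+1) = SZ.foldl (fun best l =>
      if l ≤ ((i+1 : Nat) : Int) ∧ PySem.List.slice s (some (((i+1 : Nat) : Int) - l)) (some ((i+1 : Nat) : Int)) ∈ W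
      then min best (Vdp W SZ s ((i+1) - l.toNat)) else best) (Vdp W SZ s i + 1) := by
  have hlen := length_buildDp W SZ s i
  show (buildDp W SZ s (i+1)).getD (i+1) 0 = _
  rw [show buildDp W SZ s (i+1) = buildDp W SZ s i ++ [_] from rfl]
  rw [List.getD_append_right _ _ _ _ (by omega)]
  rw [hlen, Nat.sub_self]
  simp only [List.getD_cons_zero]
  rw [buildDp_getD W SZ s (le_refl i)]
  apply PySem.List.foldl_congr_mem
  intro acc l hl
  by_cases hc : l ≤ ((i+1 : Nat) : Int) ∧ PySem.List.slice s (some (((i+1 : Nat) : Int) - l)) (some ((i+1 : Nat) : Int)) ∈ W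
  · rw [if_pos hc, if_pos hc,
      buildDp_getD W SZ s (show i+1-l.toNat ≤ i by have := hSZ l hl; omega)]
  · rw [if_neg hc, if_neg hc]

theorem foldl_if_min {c : Int → Prop} [DecidablePred c] (f : Int → Int) :
    ∀ (ls : List Int) (init : Int),
    List.foldl (fun b l => if c l then min b (f l) else b) init ls
      = List.foldl min init ((ls.filter (fun l => decide (c l))).map f) := by
  intro ls
  induction ls with
  | nil => intro init; rfl
  | cons l ls ih =>
    intro init
    by_cases h : c l <;> simp [h, ih]

def MemoOK (W : List (List Char)) (SZ : List Int) (s : List Char) (memo : PySem.Dict Int Int) : Prop :=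
  ∀ k v, memo.get? k = some v → ∃ j : Nat, k = (j : Int) ∧ v = Vdp W SZ s j

theorem dfsACands_spec (W : List (List Char)) (SZ : List Int) (s : List Char)
    (hSZ : ∀ l ∈ SZ, 1 ≤ l) (ip1 : Nat)
    (IH : ∀ k, k < ip1 → ∀ memo, MemoOK W SZ s memo →
      (dfsA W SZ s k memo).1 = Vdp W SZ s k ∧ MemoOK W SZ s (dfsA W SZ s k memo).2) :
    ∀ (ls : List Int) (memo : PySem.Dict Int Int), MemoOK W SZ s memo →
      (dfsACands W SZ s ip1 ls memo).1
        = (ls.filter (fun l => decide (1 ≤ l ∧ 0 ≤ (ip1 : Int) - l ∧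
            PySem.List.slice s (some ((ip1 : Int) - l)) (some (ip1 : Int)) ∈ W))).map
            (fun l => Vdp W SZ s (ip1 - l.toNat))
        ∧ MemoOK W SZ s (dfsACands W SZ s ip1 ls memo).2 := by
  intro ls
  induction ls with
  | nil => intro memo hm; rw [dfsACands]; exact ⟨rfl, hm⟩
  | cons l ls ih =>
    intro memo hm
    rw [dfsACands]
    by_cases hc : 1 ≤ l ∧ 0 ≤ (ip1 : Int) - l ∧
        PySem.List.slice s (some ((ip1 : Int) - l)) (some (ip1 : Int)) ∈ W
    · rw [dif_pos hc]
      have hlt : ip1 - l.toNat < ip1 := by obtain ⟨h1, h2, -⟩ := hc; omega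
      have h1 := IH _ hlt memo hm
      have h2 := ih _ h1.2
      refine ⟨?_, h2.2⟩
      rw [List.filter_cons, if_pos (by exact decide_eq_true hc)]
      simp only [List.map_cons]
      rw [h1.1, h2.1]
    · rw [dif_neg hc]
      rw [List.filter_cons, if_neg (by simpa using hc)]
      exact ih memo hm

theorem dfsA_spec (W : List (List Char)) (SZ : List Int) (s : List Char)
    (hSZ : ∀ l ∈ SZ, 1 ≤ l) :
    ∀ i memo, MemoOK W SZ s memo →
      (dfsA W SZ s i memo).1 = Vdp W SZ s i ∧ MemoOK W SZ s (dfsA W SZ s i memo).2 := by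
  intro i
  induction i using Nat.strong_induction_on with
  | _ i IH' =>
    match i with
    | 0 =>
      intro memo hm
      rw [dfsA]
      exact ⟨rfl, hm⟩
    | (j+1) =>
      intro memo hm
      have IH : ∀ k, k < j+1 → ∀ memo, MemoOK W SZ s memo →
          (dfsA W SZ s k memo).1 = Vdp W SZ s k ∧ MemoOK W SZ s (dfsA W SZ s k memo).2 :=
        fun k hk => IH' k hk
      rw [dfsA]
      cases hg : memo.get? ((j+1 : Nat) : Int) with
      | some v =>
        obtain ⟨k, hk, hv⟩ := hm _ _ hg
        have hkj : k = j+1 := by exact_mod_cast hk.symm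
        subst hkj
        exact ⟨hv, hm⟩
      | none =>
        have h0 := IH j (by omega) memo hm
        have hca := dfsACands_spec W SZ s hSZ (j+1) (fun k hk => IH k hk) SZ _ h0.2
        have hval : ((dfsACands W SZ s (j+1) SZ (dfsA W SZ s j memo).2).1).foldl min
            (1 + (dfsA W SZ s j memo).1) = Vdp W SZ s (j+1) := by
          rw [h0.1, hca.1, Vdp_succ W SZ s hSZ j, foldl_if_min]
          rw [show (1 : Int) + Vdp W SZ s j = Vdp W SZ s j + 1 from add_comm 1 _]
          congr 1
          refine congrArg _ (List.filter_congr ?_)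
          intro l hl
          rw [decide_eq_decide]
          have h1 := hSZ l hl
          constructor
          · rintro ⟨-, hb, hmem⟩; exact ⟨by omega, hmem⟩
          · rintro ⟨hb, hmem⟩; exact ⟨h1, by omega, hmem⟩
        refine ⟨hval, ?_⟩
        intro k v hkv
        by_cases hk : k = ((j+1 : Nat) : Int)
        · subst hk
          rw [PySem.Dict.get?_insert_self] at hkv
          exact ⟨j+1, rfl, by rw [← hval]; exact (Option.some.injEq _ _ ▸ hkv).symm⟩
        · rw [PySem.Dict.get?_insert_of_ne _ _ hk] at hkv
          exact hca.2 _ _ hkv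

theorem dfsA_zero (W : List (List Char)) (SZ : List Int) (s : List Char)
    (memo : PySem.Dict Int Int) : dfsA W SZ s 0 memo = (0, memo) := by
  rw [dfsA]

theorem memoOK_empty (W : List (List Char)) (SZ : List Int) (s : List Char) :
    MemoOK W SZ s PySem.Dict.empty := by
  intro k v h
  rw [PySem.Dict.get?_empty] at h
  exact absurd h (by simp)

theorem hSZ_of_no_empty_word (dictionary : List String) (sentence : String)
    (hne : "" ∉ dictionary) :
    ∀ l ∈ (PySem.Set.ofList ((PySem.Set.ofList (dictionary.filter
        (fun w => PySem.Str.isIn w sentence))).map (fun w => PySem.Str.len w)) : List Int),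
      1 ≤ l := by
  intro l hl
  rw [PySem.Set.mem_ofList] at hl
  obtain ⟨w, hw, rfl⟩ := List.mem_map.mp hl
  rw [PySem.Set.mem_ofList] at hw
  have hwd : w ∈ dictionary := List.mem_of_mem_filter hw
  have hwne : w ≠ "" := fun h => hne (h ▸ hwd)
  rw [PySem.Str.len_eq]
  have hnil : w.toList ≠ [] := fun h => hwne (String.toList_eq_nil_iff.mp h)
  have : 0 < w.toList.length := List.length_pos_iff.mpr hnil
  exact_mod_cast this

-- ===== VERDICT (by name: the statement is the Claim_ definition above) =====
theorem respace_spec : Claim_equal_respace := by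
  intro dictionary sentence _hdom hpre
  show respace dictionary sentence = respace_alt dictionary sentence
  have hfilter : dictionary.filter (fun w => PySem.Str.find sentence w != -1)
      = dictionary.filter (fun w => PySem.Str.isIn w sentence) := by
    apply List.filter_congr
    intro w _
    rw [Bool.eq_iff_iff]
    simp [bne_iff_ne, PySem.Chars.find_ne_neg_one_iff, PySem.Chars.isIn_iff_infix]
  rw [respace, respace_alt, hfilter]
  by_cases hemp : (PySem.Set.ofList (dictionary.filter
      (fun w => PySem.Str.isIn w sentence)) : List String).isEmpty
  · rw [if_pos hemp, if_pos hemp]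
  · rw [if_neg hemp, if_neg hemp]
    rcases hpre with hne | hempty
    · have h := dfsA_spec
        ((PySem.Set.ofList (dictionary.filter (fun w => PySem.Str.isIn w sentence))).map String.toList)
        (PySem.Set.ofList ((PySem.Set.ofList (dictionary.filter
          (fun w => PySem.Str.isIn w sentence))).map (fun w => PySem.Str.len w)))
        sentence.toList (hSZ_of_no_empty_word dictionary sentence hne)
        sentence.toList.length PySem.Dict.empty (memoOK_empty _ _ _)
      exact h.1
    · subst hempty
      rw [show ("".toList : List Char) = [] from String.toList_empty]
      rw [show ([] : List Char).length = 0 from rfl]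
      exact (congrArg Prod.fst (dfsA_zero _ _ _ _)).trans rfl
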